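-- pv_equiv track=rewrite | github.com/nero96in/backjoon | 2020 google codejam/codejam4.py | make_candidates
-- ===== SOURCE A (Python) =====
-- def make_candidates(digits):
--     A = []
--     for e1 in digits:
--         if e1 == 0: A.append(1)
--         elif e1 == 1: A.append(0)
--         else: A.append(None)
--     B2 = digits[::-1]
--     C = []
--     for e2 in B2:
--         if e2 == 0: C.append(1)
--         elif e2 == 1: C.append(0)
--         else: C.append(None)
--     D = digits
--     return [A, B2, C, D]
-- ===== SOURCE B (Python) =====
-- def make_candidates(digits):
--     # Divide and conquer: go(lo, hi) returns (flipped, reversed, reversed-flipped)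
--     # of digits[lo:hi]; the halves merge by concatenation (reversal swaps them).
--     def go(lo, hi):
--         if hi - lo == 0:
--             return [], [], []
--         if hi - lo == 1:
--             e = digits[lo]
--             f = 1 - e if e == 0 or e == 1 else None
--             return [f], [e], [f]
--         mid = (lo + hi) // 2
--         a1, b1, c1 = go(lo, mid)
--         a2, b2, c2 = go(mid, hi)
--         return a1 + a2, b2 + b1, c2 + c1
--     A, B2, C = go(0, len(digits))
--     return [A, B2, C, digits]
-- ===== Notes on version B (the rewrite author's own statement) =====
-- stated objective: alternative
-- what changed: Replaces A's two staged append loops and slice with a divide-and-conquer recursion that splits the index range in half and builds the flipped, reversed and reversed-flipped lists simultaneously, merging halves by concatenation (reversal swaps the halves).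
import Mathlib
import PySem

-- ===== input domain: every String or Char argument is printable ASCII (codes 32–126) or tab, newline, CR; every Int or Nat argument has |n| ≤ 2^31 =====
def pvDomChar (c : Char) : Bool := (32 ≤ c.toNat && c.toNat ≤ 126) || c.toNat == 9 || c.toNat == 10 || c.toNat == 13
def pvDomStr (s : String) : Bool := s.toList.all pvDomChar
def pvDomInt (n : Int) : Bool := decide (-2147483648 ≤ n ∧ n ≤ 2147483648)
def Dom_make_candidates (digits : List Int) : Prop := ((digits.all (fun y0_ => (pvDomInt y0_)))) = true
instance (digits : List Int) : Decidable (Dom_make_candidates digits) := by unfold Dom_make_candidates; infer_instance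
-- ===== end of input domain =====

-- B replaces A's two staged append loops and slice with a divide-and-conquer recursion
-- building the flipped, reversed and reversed-flipped lists simultaneously; objective: alternative.


-- ===== PORT A =====
-- A builds each of A and C by a for-loop appending one element per input element.
def make_candidates (digits : List Int) : List (List (Option Int)) :=
  let A := digits.foldl (fun acc e1 =>
    if e1 = 0 then acc ++ [some 1]
    else if e1 = 1 then acc ++ [some 0]
    else acc ++ [none]) []
  let B2 := (PySem.List.slice? digits none none (-1)).getD []
  let C := B2.foldl (fun acc e2 =>
    if e2 = 0 then acc ++ [some 1]
    else if e2 = 1 then acc ++ [some 0]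
    else acc ++ [none]) []
  let D := digits
  [A, B2.map some, C, D.map some]

-- ===== PORT B =====
-- pvGo ports go(lo, hi) acting on the slice digits[lo:hi] (represented as the list xs;
-- Python's relative midpoint (lo+hi)//2 - lo equals (hi-lo)//2 = xs.length / 2).
-- The fuel argument (always ≥ xs.length) only makes the recursion structural; it
-- changes nothing about the computation.
def pvGo : Nat → List Int → List (Option Int) × List Int × List (Option Int)
  | 0, _ => ([], [], [])
  | fuel + 1, xs =>
    if xs.length = 0 then ([], [], [])
    else if xs.length = 1 then
      let e := xs.headI
      let f := if e = 0 ∨ e = 1 then some (1 - e) else none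
      ([f], [e], [f])
    else
      let mid := xs.length / 2
      let r1 := pvGo fuel (xs.take mid)
      let r2 := pvGo fuel (xs.drop mid)
      (r1.1 ++ r2.1, r2.2.1 ++ r1.2.1, r2.2.2 ++ r1.2.2)

def make_candidates_alt (digits : List Int) : List (List (Option Int)) :=
  let r := pvGo digits.length digits
  [r.1, r.2.1.map some, r.2.2, digits.map some]

-- ===== PRECONDITION & SPEC =====
def Spec_make_candidates (digits : List Int) (out : List (List (Option Int))) : Prop := out = make_candidates_alt digits
instance (digits : List Int) (out : List (List (Option Int))) : Decidable (Spec_make_candidates digits out) := by unfold Spec_make_candidates; infer_instance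

-- ===== CLAIM (what is proved, stated in full; the proofs are below) =====
def Claim_equal_make_candidates : Prop := ∀ (digits : List Int), Dom_make_candidates digits → Spec_make_candidates digits (make_candidates digits)

-- ===== LEMMAS AND PROOFS =====
def pvFlip (e : Int) : Option Int := if e = 0 ∨ e = 1 then some (1 - e) else none

-- A's append loop over any list equals mapping pvFlip over it.
theorem pv_foldl_eq_map (xs : List Int) (acc : List (Option Int)) :
    xs.foldl (fun acc e =>
      if e = 0 then acc ++ [some 1]
      else if e = 1 then acc ++ [some 0]
      else acc ++ [none]) acc = acc ++ xs.map pvFlip := by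
  induction xs generalizing acc with
  | nil => simp
  | cons x xs ih =>
    simp only [List.foldl_cons, List.map_cons, ih, pvFlip]
    split_ifs with h1 h2 <;> simp_all

-- B's divide-and-conquer recursion computes exactly the three lists (fuel suffices).
theorem pvGo_eq (fuel : Nat) (xs : List Int) (hf : xs.length ≤ fuel) :
    pvGo fuel xs = (xs.map pvFlip, xs.reverse, xs.reverse.map pvFlip) := by
  induction fuel generalizing xs with
  | zero =>
    have : xs = [] := List.length_eq_zero_iff.mp (Nat.le_zero.mp hf)
    subst this; rfl
  | succ fuel ih =>
    rw [pvGo]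
    by_cases h0 : xs.length = 0
    · have : xs = [] := List.length_eq_zero_iff.mp h0
      subst this; rfl
    · by_cases h1 : xs.length = 1
      · obtain ⟨e, he⟩ := List.length_eq_one_iff.mp h1
        subst he
        simp [pvFlip]
      · simp only [h0, h1, if_false]
        rw [ih _ (by simp only [List.length_take]; omega),
            ih _ (by simp only [List.length_drop]; omega)]
        refine Prod.ext ?_ (Prod.ext ?_ ?_) <;>
          simp [List.map_take, List.map_drop] <;>
          rw [← List.reverse_append, List.take_append_drop]

-- ===== VERDICT (by name: the statement is the Claim_ definition above) =====
theorem make_candidates_spec : Claim_equal_make_candidates := by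
  intro digits _
  unfold Spec_make_candidates make_candidates make_candidates_alt
  simp only [PySem.List.slice?_none_none_neg_one, Option.getD_some,
    pvGo_eq digits.length digits le_rfl]
  rw [pv_foldl_eq_map, pv_foldl_eq_map]
  simp
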